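-- pv_equiv track=rewrite | github.com/239484654/Simple-Calculator | Simple-Calculator.py | add_fraction
-- ===== SOURCE A (Python) =====
-- def add_fraction(num, reg=0):
--     tmp = ""
--     lst = [0, 0]
--     apk = [["Decimal('", "(Fraction(Decimal('"][reg], [")*1j)", "'))*1j)"][reg]]
--     i = 0
--     while i < len(num):
--         char = num[i]
--         if char in ["1", "2", "3", "4", "5", "6", "7", "8", "9", "0", "j", "i", "."]:
--             if char in ["j", "i"]:
--                 if lst[0] == 1:
--                     tmp += apk[1]
--                     lst[0], lst[1] = 0, 0
--                 else:
--                     tmp += "1j"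
--             else:
--                 if reg == 1 and char != "." and lst[0] == 0:
--                     tmp += apk[0]
--                     lst[0], lst[1] = 1, 1
--                 tmp += char
--         else:
--             if lst[0] == 1:
--                 if lst[1] == 1:
--                     tmp += "'))"
--                     lst[1] = 0
--                 tmp += ")"
--             lst[0] = 0
--             tmp += char
--         i += 1
--     if lst[0] == 1:
--         tmp += "')"
--         if lst[1] == 1:
--             tmp += "))"
--     return tmp
-- ===== SOURCE B (Python) =====
-- def add_fraction(num, reg=0):
--     # Token scan: maximal numeric runs (starting with a digit) are wrapped in one
--     # go; everything else is copied, with i/j mapped to 1j.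
--     if reg != 1:
--         return "".join("1j" if c in "ij" else c for c in num)
--     out = []
--     i = 0
--     n = len(num)
--     while i < n:
--         c = num[i]
--         if c in "0123456789":
--             j = i + 1
--             while j < n and num[j] in "0123456789.":
--                 j += 1
--             run = num[i:j]
--             if j < n and num[j] in "ij":
--                 out.append("(Fraction(Decimal('" + run + "'))*1j)")
--                 i = j + 1
--             else:
--                 out.append("(Fraction(Decimal('" + run + "')))")
--                 i = j
--         elif c in "ij":
--             out.append("1j")
--             i += 1
--         else:
--             out.append(c)
--             i += 1
--     return "".join(out)
-- ===== Notes on version B (the rewrite author's own statement) =====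
-- stated objective: alternative
-- what changed: Replaced the per-character two-flag state machine with a per-token scan that finds each maximal numeric run (a digit followed by digits/dots) and emits its whole wrapped form at once, with a separate plain-translation path for reg != 1.
import Mathlib
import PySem

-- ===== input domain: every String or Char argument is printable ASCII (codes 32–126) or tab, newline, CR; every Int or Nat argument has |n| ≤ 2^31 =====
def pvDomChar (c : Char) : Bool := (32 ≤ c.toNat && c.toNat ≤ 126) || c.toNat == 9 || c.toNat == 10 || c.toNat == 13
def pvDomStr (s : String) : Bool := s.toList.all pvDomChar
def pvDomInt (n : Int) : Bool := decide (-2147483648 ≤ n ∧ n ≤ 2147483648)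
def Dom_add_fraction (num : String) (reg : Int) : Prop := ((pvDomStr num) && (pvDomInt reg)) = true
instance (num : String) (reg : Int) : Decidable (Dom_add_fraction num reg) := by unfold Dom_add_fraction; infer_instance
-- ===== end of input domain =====

-- B replaces A's per-character flag machine by a per-token scan over maximal numeric runs (different decomposition, same cost).


-- ===== PORT A =====
-- A's while-loop over the characters with state lst = [l0, l1] and accumulator tmp
-- (strings handled as List Char; the after-loop close lives in the [] case).
def afLoop (reg : Int) (apk0 apk1 : List Char) : List Char → Int → Int → List Char → List Char
  | [], l0, l1, tmp =>
    if l0 = 1 then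
      (if l1 = 1 then (tmp ++ "')".toList) ++ "))".toList else tmp ++ "')".toList)
    else tmp
  | c :: rest, l0, l1, tmp =>
    if c ∈ ['1','2','3','4','5','6','7','8','9','0','j','i','.'] then
      if c = 'j' ∨ c = 'i' then
        if l0 = 1 then afLoop reg apk0 apk1 rest 0 0 (tmp ++ apk1)
        else afLoop reg apk0 apk1 rest l0 l1 (tmp ++ "1j".toList)
      else
        if reg = 1 ∧ c ≠ '.' ∧ l0 = 0 then afLoop reg apk0 apk1 rest 1 1 ((tmp ++ apk0) ++ [c])
        else afLoop reg apk0 apk1 rest l0 l1 (tmp ++ [c])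
    else
      let tmp1 := if l0 = 1 then (if l1 = 1 then (tmp ++ "'))".toList) ++ ")".toList else tmp ++ ")".toList) else tmp
      let l1' := if l0 = 1 ∧ l1 = 1 then 0 else l1
      afLoop reg apk0 apk1 rest 0 l1' (tmp1 ++ [c])

-- apk = [["Decimal('", "(Fraction(Decimal('"][reg], [")*1j)", "'))*1j)"][reg]]
-- (Python list indexing; none = IndexError, excluded by Pre_).
def add_fraction (num : String) (reg : Int) : String :=
  let apk0 := (PySem.List.pyGet? ["Decimal('".toList, "(Fraction(Decimal('".toList] reg).getD []
  let apk1 := (PySem.List.pyGet? [")*1j)".toList, "'))*1j)".toList] reg).getD []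
  String.mk (afLoop reg apk0 apk1 num.toList 0 0 [])

-- ===== PORT B =====
def bfIsDig (c : Char) : Bool := c ∈ ['0','1','2','3','4','5','6','7','8','9']
def bfIsDD (c : Char) : Bool := bfIsDig c || c = '.'
def bfIsIJ (c : Char) : Bool := c = 'i' || c = 'j'

-- the run-finding inner while becomes takeWhile/dropWhile on the rest of the string
def bfScan : List Char → List Char
  | [] => []
  | c :: rest =>
    if bfIsDig c then
      let run := c :: rest.takeWhile bfIsDD
      match h : rest.dropWhile bfIsDD with
      | d :: rest2 =>
        if bfIsIJ d then
          ("(Fraction(Decimal('".toList ++ run ++ "'))*1j)".toList) ++ bfScan rest2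
        else
          ("(Fraction(Decimal('".toList ++ run ++ "')))".toList) ++ bfScan (d :: rest2)
      | [] => "(Fraction(Decimal('".toList ++ run ++ "')))".toList
    else if bfIsIJ c then "1j".toList ++ bfScan rest
    else c :: bfScan rest
  termination_by l => l.length
  decreasing_by
    all_goals first
    | (have h2 := List.length_dropWhile_le (p := bfIsDD) (l := rest)
       rw [h] at h2; simp at h2 ⊢; omega)
    | simp

def add_fraction_alt (num : String) (reg : Int) : String :=
  if reg ≠ 1 then
    String.mk (num.toList.flatMap (fun c => if bfIsIJ c then "1j".toList else [c]))
  else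
    String.mk (bfScan num.toList)

-- ===== PRECONDITION & SPEC =====
-- Pre_ excludes exactly the reg values on which A's list indexing apk[reg] raises IndexError.
def Pre_add_fraction (num : String) (reg : Int) : Prop := -2 ≤ reg ∧ reg ≤ 1
instance (num : String) (reg : Int) : Decidable (Pre_add_fraction num reg) := by unfold Pre_add_fraction; infer_instance
def pvWitness_add_fraction : String × Int := ("3.5i+2", 1)

def Spec_add_fraction (num : String) (reg : Int) (out : String) : Prop := out = add_fraction_alt num reg
instance (num : String) (reg : Int) (out : String) : Decidable (Spec_add_fraction num reg out) := by unfold Spec_add_fraction; infer_instance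

-- ===== CLAIM (what is proved, stated in full; the proofs are below) =====
def Claim_equal_add_fraction : Prop := ∀ (num : String) (reg : Int), Dom_add_fraction num reg → Pre_add_fraction num reg → Spec_add_fraction num reg (add_fraction num reg)

-- ===== LEMMAS AND PROOFS =====

-- reg ≠ 1: the flags never leave (0,0); A is the plain per-character translation.
theorem afLoop_simple (reg : Int) (hreg : reg ≠ 1) (a0 a1 : List Char) :
    ∀ cs tmp, afLoop reg a0 a1 cs 0 0 tmp
      = tmp ++ cs.flatMap (fun c => if bfIsIJ c then "1j".toList else [c]) := by
  intro cs
  induction cs with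
  | nil => intro tmp; simp [afLoop]
  | cons c rest ih =>
    intro tmp
    by_cases hij : c = 'j' ∨ c = 'i'
    · have hm : c ∈ ['1','2','3','4','5','6','7','8','9','0','j','i','.'] := by
        rcases hij with h | h <;> simp [h]
      have hij' : bfIsIJ c = true := by rcases hij with h | h <;> simp [h, bfIsIJ]
      rw [afLoop]
      simp only [hm, if_true, hij, if_true]
      have h01 : ¬ ((0 : Int) = 1) := by decide
      simp only [h01, if_false]
      rw [ih]
      simp [hij']
    · have hij' : ¬ bfIsIJ c = true := by simp [bfIsIJ]; tauto
      by_cases hm : c ∈ ['1','2','3','4','5','6','7','8','9','0','j','i','.']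
      · rw [afLoop]
        simp only [hm, if_true, hij, if_false, hreg, false_and, if_false]
        rw [ih]
        simp [hij']
      · rw [afLoop]
        simp only [hm, if_false]
        have h01 : ¬ ((0 : Int) = 1) := by decide
        simp only [h01, if_false, false_and]
        rw [ih]
        simp [hij']

def bfA0 : List Char := "(Fraction(Decimal('".toList
def bfA1 : List Char := "'))*1j)".toList

-- what A produces from inside an active run (state (1,1)) on the remaining input
def runSpec (cs : List Char) : List Char :=
  cs.takeWhile bfIsDD ++
    match cs.dropWhile bfIsDD with
    | [] => "')))".toList
    | d :: rest2 =>
      if bfIsIJ d then "'))*1j)".toList ++ bfScan rest2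
      else "')))".toList ++ bfScan (d :: rest2)

theorem bfScan_ij (c : Char) (rest : List Char) (hdig : ¬ bfIsDig c = true)
    (hij : bfIsIJ c = true) : bfScan (c :: rest) = "1j".toList ++ bfScan rest := by
  conv_lhs => rw [bfScan.eq_def]
  simp [hdig, hij]

theorem bfScan_other (c : Char) (rest : List Char) (hdig : ¬ bfIsDig c = true)
    (hij : ¬ bfIsIJ c = true) : bfScan (c :: rest) = c :: bfScan rest := by
  conv_lhs => rw [bfScan.eq_def]
  simp [hdig, hij]

theorem bfScan_digit (c : Char) (rest : List Char) (hc : bfIsDig c = true) :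
    bfScan (c :: rest) = (bfA0 ++ [c]) ++ runSpec rest := by
  rw [bfScan]
  simp only [hc, if_true]
  cases h : rest.dropWhile bfIsDD with
  | nil => simp [runSpec, h, bfA0]
  | cons d rest2 =>
    by_cases hd : bfIsIJ d = true <;> simp [runSpec, h, hd, bfA0]

theorem af_main_aux :
    ∀ n cs, cs.length ≤ n →
      (∀ tmp, afLoop 1 bfA0 bfA1 cs 0 0 tmp = tmp ++ bfScan cs) ∧
      (∀ tmp, afLoop 1 bfA0 bfA1 cs 1 1 tmp = tmp ++ runSpec cs) := by
  intro n
  induction n with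
  | zero =>
    intro cs hcs
    have : cs = [] := by cases cs <;> simp_all
    subst this
    constructor <;> intro tmp <;> simp [afLoop, bfScan, runSpec, bfA1]
  | succ n ih =>
    intro cs hcs
    cases cs with
    | nil =>
      constructor <;> intro tmp <;> simp [afLoop, bfScan, runSpec, bfA1]
    | cons c rest =>
      have hlen : rest.length ≤ n := by simp at hcs; omega
      have ihm := (ih rest hlen).1
      have iha := (ih rest hlen).2
      have hmem : (c ∈ ['1','2','3','4','5','6','7','8','9','0','j','i','.'])
          ↔ (bfIsDig c = true ∨ c = '.' ∨ c = 'j' ∨ c = 'i') := by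
        simp [bfIsDig]; tauto
      constructor
      · -- state (0,0)
        intro tmp
        by_cases hdig : bfIsDig c = true
        · -- digit: open the wrap
          have hm : c ∈ ['1','2','3','4','5','6','7','8','9','0','j','i','.'] := hmem.mpr (Or.inl hdig)
          have hij : ¬ (c = 'j' ∨ c = 'i') := by
            rintro (h | h) <;> subst h <;> simp [bfIsDig] at hdig
          have hdot : c ≠ '.' := by rintro h; subst h; simp [bfIsDig] at hdig
          rw [afLoop]
          simp only [hm, if_true, hij, if_false]
          simp only [hdot, ne_eq, not_false_iff, and_true, true_and, if_true, and_self, if_pos rfl]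
          rw [iha, bfScan_digit c rest hdig]
          simp
        · by_cases hij : c = 'j' ∨ c = 'i'
          · have hm : c ∈ ['1','2','3','4','5','6','7','8','9','0','j','i','.'] := by
              rcases hij with h | h <;> simp [h]
            have hij' : bfIsIJ c = true := by rcases hij with h | h <;> simp [h, bfIsIJ]
            rw [afLoop]
            simp only [hm, if_true, hij, if_true]
            have h01 : (0 : Int) ≠ 1 := by decide
            simp only [h01, if_false]
            rw [ihm, bfScan_ij c rest hdig hij']
            simp
          · by_cases hdot : c = '.'
            · subst hdot
              have hm : ('.' : Char) ∈ ['1','2','3','4','5','6','7','8','9','0','j','i','.'] := by decide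
              rw [afLoop]
              simp only [hm, if_true, hij, if_false, ne_eq, not_true_eq_false, and_false,
                false_and, if_false]
              rw [ihm, bfScan_other '.' rest (by decide) (by decide)]
              simp
            · have hm : ¬ c ∈ ['1','2','3','4','5','6','7','8','9','0','j','i','.'] := by
                rw [hmem]; tauto
              rw [afLoop]
              simp only [hm, if_false]
              have h01 : (0 : Int) ≠ 1 := by decide
              simp only [h01, if_false, false_and]
              have hij' : ¬ bfIsIJ c = true := by
                simp only [bfIsIJ, Bool.or_eq_true, decide_eq_true_eq]; tauto
              rw [ihm, bfScan_other c rest hdig hij']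
              simp
      · -- state (1,1): inside a run
        intro tmp
        by_cases hdd : bfIsDD c = true
        · have hm : c ∈ ['1','2','3','4','5','6','7','8','9','0','j','i','.'] := by
            rw [hmem]; simp [bfIsDD] at hdd; tauto
          have hij : ¬ (c = 'j' ∨ c = 'i') := by
            rintro (h | h) <;> subst h <;> simp [bfIsDD, bfIsDig] at hdd
          rw [afLoop]
          simp only [hm, if_true, hij, if_false]
          have h10 : (1 : Int) ≠ 0 := by decide
          simp only [h10, and_false, if_false]
          rw [iha]
          simp [runSpec, List.takeWhile_cons, List.dropWhile_cons, hdd]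
        · by_cases hij : c = 'j' ∨ c = 'i'
          · have hm : c ∈ ['1','2','3','4','5','6','7','8','9','0','j','i','.'] := by
              rcases hij with h | h <;> simp [h]
            have hij' : bfIsIJ c = true := by rcases hij with h | h <;> simp [h, bfIsIJ]
            rw [afLoop]
            simp only [hm, if_true, hij, if_true, if_pos rfl]
            rw [ihm]
            simp [runSpec, List.takeWhile_cons, List.dropWhile_cons, hdd, hij', bfA1]
          · have hm : ¬ c ∈ ['1','2','3','4','5','6','7','8','9','0','j','i','.'] := by
              rw [hmem]
              rintro (h | h | h | h) <;> simp_all [bfIsDD]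
            rw [afLoop]
            simp only [hm, if_false]
            simp only [show (1 : Int) = 1 from rfl, if_true, and_self]
            rw [ihm]
            have hij' : ¬ bfIsIJ c = true := by
              simp only [bfIsIJ, Bool.or_eq_true, decide_eq_true_eq]; tauto
            have hdig : ¬ bfIsDig c = true := by
              intro h; exact hm (hmem.mpr (Or.inl h))
            have hdd' : bfIsDD c = false := by simpa using hdd
            have hij2 : bfIsIJ c = false := by simpa using hij'
            simp [runSpec, List.takeWhile_cons, List.dropWhile_cons, hdd', hij2,
              bfScan_other c rest hdig hij']

-- ===== VERDICT (by name: the statement is the Claim_ definition above) =====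
theorem add_fraction_spec : Claim_equal_add_fraction := by
  intro num reg _ hpre
  unfold Spec_add_fraction add_fraction add_fraction_alt
  obtain ⟨h1, h2⟩ := hpre
  by_cases hreg : reg = 1
  · subst hreg
    simp only [ne_eq, not_true_eq_false, if_false]
    have hget0 : (PySem.List.pyGet? ["Decimal('".toList, "(Fraction(Decimal('".toList] (1 : Int)).getD [] = bfA0 := by decide
    have hget1 : (PySem.List.pyGet? [")*1j)".toList, "'))*1j)".toList] (1 : Int)).getD [] = bfA1 := by decide
    simp only [hget0, hget1]
    rw [(af_main_aux num.toList.length num.toList le_rfl).1 []]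
    simp
  · simp only [ne_eq, hreg, not_false_iff, if_true]
    rw [afLoop_simple reg hreg _ _ num.toList []]
    simp
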